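-- pv_equiv track=rewrite | github.com/strangeprogrammer/ProjectEuler | answers/59/answer.py | spliterator
-- ===== SOURCE A (Python) =====
-- def spliterator(*args, **kwargs): # This function is necessary since (TMK) 'str.split' isn't lazy by default
-- 	def wrapped(s, delims = ' '):
-- 		previ = 0
-- 		for [i, c] in enumerate(s):
-- 			if c in delims:
-- 				yield s[previ:i]
-- 				previ = i + 1 # Skip the previous delimiter
--
-- 		yield s[previ:len(s)] # Yield the final item
--
-- 	return filter(
-- 		lambda s: 0 < len(s),
-- 		wrapped(*args, **kwargs)
-- 	)
-- ===== SOURCE B (Python) =====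
-- def spliterator(*args, **kwargs):
--     def wrapped(s, delims=' '):
--         i, n = 0, len(s)
--         while i < n:
--             if s[i] in delims:
--                 i += 1
--             else:
--                 j = i + 1
--                 while j < n and s[j] not in delims:
--                     j += 1
--                 yield s[i:j]
--                 i = j
--     return wrapped(*args, **kwargs)
-- ===== Notes on version B (the rewrite author's own statement) =====
-- stated objective: alternative
-- what changed: B yields maximal runs of non-delimiter characters directly (skip delimiters, scan each token to its end), instead of A's enumerate-with-tracked-start slicing that yields an empty slice per delimiter and filters empties afterwards.
import Mathlib
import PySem

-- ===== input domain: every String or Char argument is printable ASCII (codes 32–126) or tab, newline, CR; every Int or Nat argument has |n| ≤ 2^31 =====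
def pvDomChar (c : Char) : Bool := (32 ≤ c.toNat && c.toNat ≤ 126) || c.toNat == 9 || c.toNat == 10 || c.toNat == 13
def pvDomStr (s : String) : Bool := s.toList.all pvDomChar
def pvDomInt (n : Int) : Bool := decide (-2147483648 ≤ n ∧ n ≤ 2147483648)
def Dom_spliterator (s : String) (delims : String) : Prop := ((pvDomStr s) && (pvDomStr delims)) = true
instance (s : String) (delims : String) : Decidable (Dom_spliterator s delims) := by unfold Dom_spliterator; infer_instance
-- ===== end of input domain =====

-- B replaces A's enumerate/tracked-start slicing + empty filter by a direct maximal-run scan (alternative decomposition, same cost).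

-- ===== PORT A =====
-- Python's enumerate(s) starting at index k
def pvEnumFrom (k : Nat) : List Char → List (Nat × Char)
  | [] => []
  | c :: rest => (k, c) :: pvEnumFrom (k + 1) rest

-- A's generator 'wrapped': loop over enumerate(s), yield s[previ:i] at each delimiter,
-- then yield s[previ:len(s)].  s[a:b] with 0 ≤ a ≤ b ≤ len(s) is exactly (drop a).take (b-a).
def aGo (full : List Char) (delims : List Char) : List (Nat × Char) → Nat → List (List Char)
  | [], previ => [full.drop previ]
  | (i, c) :: rest, previ =>
    if c ∈ delims then ((full.drop previ).take (i - previ)) :: aGo full delims rest (i + 1)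
    else aGo full delims rest previ

def spliterator (s : String) (delims : String) : List String :=
  ((aGo s.toList delims.toList (pvEnumFrom 0 s.toList) 0).filter
    (fun t => 0 < t.length)).map String.mk

-- ===== PORT B =====
-- B's generator: skip delimiters; otherwise take the maximal run of non-delimiters and yield it.
def bGo (delims : List Char) : List Char → List (List Char)
  | [] => []
  | c :: rest =>
    if c ∈ delims then bGo delims rest
    else (c :: rest.takeWhile (fun x => ¬ x ∈ delims)) ::
         bGo delims (rest.dropWhile (fun x => ¬ x ∈ delims))
termination_by l => l.length
decreasing_by
  · simp
  · exact Nat.lt_succ_of_le (List.length_dropWhile_le _ _)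

def spliterator_alt (s : String) (delims : String) : List String :=
  (bGo delims.toList s.toList).map String.mk

-- ===== PRECONDITION & SPEC =====
def Spec_spliterator (s : String) (delims : String) (out : List String) : Prop := out = spliterator_alt s delims
instance (s : String) (delims : String) (out : List String) : Decidable (Spec_spliterator s delims out) := by unfold Spec_spliterator; infer_instance

-- ===== CLAIM (what is proved, stated in full; the proofs are below) =====
def Claim_equal_spliterator : Prop := ∀ (s : String) (delims : String), Dom_spliterator s delims → Spec_spliterator s delims (spliterator s delims)

-- ===== LEMMAS AND PROOFS =====

-- Main invariant: 'pend' is the already-scanned part of the current token (all non-delimiters),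
-- located at positions [previ, previ+pend.length) of 'full'; 'rest' is what remains.
theorem aGo_eq_bGo (delims : List Char) :
    ∀ (rest pend : List Char) (previ : Nat) (full : List Char),
      full.drop previ = pend ++ rest →
      (∀ c ∈ pend, c ∉ delims) →
      (aGo full delims (pvEnumFrom (previ + pend.length) rest) previ).filter
          (fun t => 0 < t.length)
        = (if pend = [] then bGo delims rest
           else (pend ++ rest.takeWhile (fun x => ¬ x ∈ delims)) ::
                bGo delims (rest.dropWhile (fun x => ¬ x ∈ delims))) := by
  intro rest
  induction rest with
  | nil =>
    intro pend previ full hdrop _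
    simp [pvEnumFrom, aGo, hdrop, bGo]
    split_ifs with h
    · simp [h]
    · simp [List.filter, List.length_pos_iff, h]
  | cons c rest ih =>
    intro pend previ full hdrop hpend
    by_cases hc : c ∈ delims
    · -- delimiter: A yields pend (filtered if empty), restarts at previ + pend.length + 1
      have htok : (full.drop previ).take ((previ + pend.length) - previ) = pend := by
        simp [hdrop]
      have hdrop' : full.drop (previ + pend.length + 1) = rest := by
        have : full.drop (previ + pend.length + 1)
            = (full.drop previ).drop (pend.length + 1) := by
          rw [List.drop_drop]; ring_nf
        rw [this, hdrop]
        simp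
      have hrec := ih [] (previ + pend.length + 1) full (by simpa using hdrop') (by simp)
      simp only [List.length_nil, Nat.add_zero, if_true] at hrec
      simp only [pvEnumFrom, aGo, if_pos hc, htok]
      rw [List.filter_cons, hrec]
      by_cases hp : pend = []
      · -- pend empty: the empty slice is filtered out; B just skips the delimiter
        subst hp
        simp [bGo, hc]
      · -- pend nonempty: it is kept; B's run at c::rest is pend itself
        simp [hp, List.length_pos_iff, hc, bGo]
    · -- non-delimiter: extend pend
      have hdrop2 : full.drop previ = (pend ++ [c]) ++ rest := by
        rw [hdrop]; simp
      have hpend2 : ∀ x ∈ pend ++ [c], x ∉ delims := by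
        intro x hx
        rcases List.mem_append.mp hx with h | h
        · exact hpend x h
        · simp at h; subst h; exact hc
      have hrec := ih (pend ++ [c]) previ full hdrop2 hpend2
      simp only [List.length_append, List.length_cons, List.length_nil] at hrec
      rw [show previ + (pend.length + (0 + 1)) = previ + pend.length + 1 by omega] at hrec
      simp only [pvEnumFrom, aGo, if_neg hc]
      rw [hrec]
      have hne : pend ++ [c] ≠ [] := by simp
      rw [if_neg hne]
      split_ifs with h
      · subst h
        simp [bGo, hc]
      · simp [hc]

-- ===== VERDICT (by name: the statement is the Claim_ definition above) =====
theorem spliterator_spec : Claim_equal_spliterator := by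
  intro s delims _
  unfold Spec_spliterator spliterator spliterator_alt
  have h := aGo_eq_bGo delims.toList s.toList [] 0 s.toList (by simp) (by simp)
  simp only [List.length_nil, Nat.add_zero, if_true] at h
  rw [h]
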